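-- pv_equiv track=rewrite | github.com/rokkafella3/codename_paene | project/gamefuncs.py | get_user_input
-- ===== SOURCE A (Python) =====
-- def get_user_input(input: str):
--     words = input.lower().split()
--     list_of_commands = []
--
--     for word in words:
--         string = ""
--         for c in word:
--             if c.isalnum():
--                 string += c
--         list_of_commands.append(string)
--
--     if not list_of_commands:
--         list_of_commands.append("")
--     return list_of_commands
-- ===== SOURCE B (Python) =====
-- def get_user_input(input: str):
--     # Single-pass tokenizer: no intermediate word list from split().
--     result = []
--     token = ""
--     in_word = False
--     for c in input.lower():
--         if c.isspace():
--             if in_word: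
--                 result.append(token)
--                 token = ""
--                 in_word = False
--         else:
--             in_word = True
--             if c.isalnum():
--                 token += c
--     if in_word:
--         result.append(token)
--     if not result:
--         result.append("")
--     return result
-- ===== Notes on version B (the rewrite author's own statement) =====
-- stated objective: alternative
-- what changed: Replaces split()-then-filter (an intermediate word list, then a rescan of each word) with a single character pass maintaining a current token and an in-word flag; same linear cost in pure Python.
import Mathlib
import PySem

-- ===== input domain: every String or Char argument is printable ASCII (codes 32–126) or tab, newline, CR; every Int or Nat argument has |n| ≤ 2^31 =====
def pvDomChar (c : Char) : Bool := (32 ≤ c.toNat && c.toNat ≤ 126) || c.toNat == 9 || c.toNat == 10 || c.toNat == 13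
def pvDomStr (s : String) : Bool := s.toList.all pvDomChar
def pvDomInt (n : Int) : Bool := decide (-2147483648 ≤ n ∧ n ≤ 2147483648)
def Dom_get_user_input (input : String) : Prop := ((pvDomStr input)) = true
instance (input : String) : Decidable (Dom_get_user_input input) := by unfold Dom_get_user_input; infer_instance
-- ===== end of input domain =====

-- B replaces split()-then-filter with a single character pass keeping a current token and an in-word flag (objective: alternative decomposition, no intermediate word list; same linear cost).

-- ===== PORT A =====
-- words = input.lower().split(); per word keep alnum chars; fallback [""] if no words
def get_user_input (input : String) : List String :=
  let words := PySem.Str.split₀ (PySem.Str.lower input)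
  let list_of_commands :=
    words.foldl (fun acc word =>
      acc ++ [String.ofList
        (word.toList.foldl (fun s c => if PySem.Chars.isalnum c then s ++ [c] else s) [])]) []
  if list_of_commands.isEmpty then list_of_commands ++ [""] else list_of_commands

-- ===== PORT B =====
-- loop state (token, in_word, result); one step of Source B's for-loop
def pvAltStep (st : List Char × Bool × List String) (c : Char) : List Char × Bool × List String :=
  let (token, in_word, result) := st
  if PySem.Chars.isspace c then
    if in_word then ([], false, result ++ [String.ofList token]) else (token, in_word, result)
  else
    if PySem.Chars.isalnum c then (token ++ [c], true, result) else (token, true, result)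

def get_user_input_alt (input : String) : List String :=
  let st := (PySem.Str.lower input).toList.foldl pvAltStep ([], false, [])
  let result := if st.2.1 then st.2.2 ++ [String.ofList st.1] else st.2.2
  if result.isEmpty then result ++ [""] else result

-- ===== PRECONDITION & SPEC =====
def Spec_get_user_input (input : String) (out : List String) : Prop := out = get_user_input_alt input
instance (input : String) (out : List String) : Decidable (Spec_get_user_input input out) := by unfold Spec_get_user_input; infer_instance

-- ===== CLAIM (what is proved, stated in full; the proofs are below) =====
def Claim_equal_get_user_input : Prop := ∀ (input : String), Dom_get_user_input input → Spec_get_user_input input (get_user_input input)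

-- ===== LEMMAS AND PROOFS =====

-- the value a word of split₀ contributes in both programs
def pvFstr (w : List Char) : String := String.ofList (w.filter PySem.Chars.isalnum)

-- B's loop state corresponds to split₀.go's (cur, acc): token = filter of cur.reverse, in_word = cur ≠ [], result = mapped acc.reverse
theorem pvAlt_go (cs : List Char) : ∀ (cur : List Char) (acc : List (List Char)),
    (let st := cs.foldl pvAltStep (cur.reverse.filter PySem.Chars.isalnum, !cur.isEmpty, (acc.reverse).map pvFstr)
     if st.2.1 then st.2.2 ++ [String.ofList st.1] else st.2.2)
    = (PySem.Chars.split₀.go cs cur acc).map pvFstr := by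
  induction cs with
  | nil =>
    intro cur acc
    simp only [List.foldl_nil, PySem.Chars.split₀.go]
    cases cur with
    | nil => simp
    | cons c cur' => simp [pvFstr]
  | cons c rest ih =>
    intro cur acc
    simp only [List.foldl_cons, PySem.Chars.split₀.go, pvAltStep]
    by_cases hs : PySem.Chars.isspace c
    · simp only [hs, if_true]
      cases cur with
      | nil => simpa using ih [] acc
      | cons d cur' =>
        have h := ih [] ((d :: cur').reverse :: acc)
        simp only [List.reverse_nil, List.filter_nil, List.isEmpty_nil, Bool.not_true,
          List.reverse_cons, List.map_append, List.map_cons, List.map_nil, pvFstr] at h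
        simp only [List.isEmpty_cons, Bool.not_false, List.reverse_cons, if_true]
        exact h
    · simp only [hs, Bool.false_eq_true, if_false]
      by_cases ha : PySem.Chars.isalnum c
      · have := ih (c :: cur) acc
        simp only [List.reverse_cons, List.filter_append, List.filter_cons, ha, if_true,
          List.filter_nil, List.isEmpty_cons, Bool.not_false] at this ⊢
        simpa using this
      · have := ih (c :: cur) acc
        simp only [List.reverse_cons, List.filter_append, List.filter_cons, ha,
          List.filter_nil, List.isEmpty_cons, Bool.not_false] at this ⊢
        simpa using this

-- ===== VERDICT (by name: the statement is the Claim_ definition above) =====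
theorem get_user_input_spec : Claim_equal_get_user_input := by
  intro input _
  unfold Spec_get_user_input get_user_input get_user_input_alt
  have hB := pvAlt_go (PySem.Str.lower input).toList [] []
  simp only [List.reverse_nil, List.filter_nil, List.isEmpty_nil, Bool.not_true,
    List.map_nil] at hB
  dsimp only
  have hA : (PySem.Str.split₀ (PySem.Str.lower input)).foldl
      (fun acc word =>
        acc ++ [String.ofList
          (word.toList.foldl (fun s c => if PySem.Chars.isalnum c then s ++ [c] else s) [])]) []
      = (PySem.Chars.split₀ (PySem.Str.lower input).toList).map pvFstr := by
    rw [PySem.List.foldl_append_singleton_eq_map]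
    rw [← PySem.Str.split₀_map_toList, List.map_map]
    simp [Function.comp, pvFstr, PySem.List.foldl_append_if_eq_filter]
  rw [hA, hB]
  rfl
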